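-- pv_equiv track=rewrite | github.com/DuncanSmith147/RP4 | analyze.py | _eval_indices2_
-- ===== SOURCE A (Python) =====
-- def _eval_indices2_(indices):
--     # brute force approach for testing purposes
--     # checks each element in the Cartesian product
--     # for monotonicity
--     from itertools import product
--     indices = [sorted(lis) for lis in indices]
--     cnt = 0
--     for tup in product(*indices):
--         if all(v<w for v, w in zip(tup, tup[1:])):
--             cnt += 1
--     return cnt
-- ===== SOURCE B (Python) =====
-- def _eval_indices2_(indices):
--     # DP over the lists: counts[j] = number of strictly increasing tuples
--     # through the lists processed so far that end at vals[j].
--     if not indices: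
--         return 1
--     vals = indices[0]
--     counts = [1] * len(vals)
--     for nxt in indices[1:]:
--         counts = [sum(c for v, c in zip(vals, counts) if v < w) for w in nxt]
--         vals = nxt
--     return sum(counts)
-- ===== Notes on version B (the rewrite author's own statement) =====
-- stated objective: faster
-- what changed: Replaces the brute-force scan of the whole Cartesian product with a layer-by-layer dynamic program that carries, for each element of the current list, the number of strictly increasing tuples ending there.
import Mathlib
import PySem

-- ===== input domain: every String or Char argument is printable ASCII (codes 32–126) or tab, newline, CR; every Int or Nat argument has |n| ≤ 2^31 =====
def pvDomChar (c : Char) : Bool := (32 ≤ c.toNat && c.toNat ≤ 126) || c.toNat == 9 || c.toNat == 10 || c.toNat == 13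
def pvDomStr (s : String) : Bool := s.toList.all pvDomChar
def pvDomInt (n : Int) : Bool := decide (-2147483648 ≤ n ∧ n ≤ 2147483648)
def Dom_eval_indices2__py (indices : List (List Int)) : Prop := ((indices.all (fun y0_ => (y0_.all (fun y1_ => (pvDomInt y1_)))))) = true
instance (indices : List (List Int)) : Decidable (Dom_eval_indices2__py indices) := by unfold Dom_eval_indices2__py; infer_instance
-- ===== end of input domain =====

-- B replaces A's exponential scan of the Cartesian product by a per-list dynamic
-- program counting increasing tuples ending at each element (objective: faster).

-- ===== PORT A =====
-- itertools.product(*indices), in Python's order (first list outermost)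
def pvProd : List (List Int) → List (List Int)
  | [] => [[]]
  | l :: rest => l.flatMap (fun x => (pvProd rest).map (fun t => x :: t))

-- all(v<w for v, w in zip(tup, tup[1:]))
def pvIncr (t : List Int) : Bool := (t.zip (t.drop 1)).all (fun p => decide (p.1 < p.2))

def eval_indices2__py (indices : List (List Int)) : Int :=
  let idx := indices.map (fun lis => PySem.List.sorted lis (fun x => x) false)
  (pvProd idx).foldl (fun cnt tup => if pvIncr tup then cnt + 1 else cnt) 0

-- ===== PORT B =====
-- sum(c for v, c in zip(vals, counts) if v < w)
def pvRowSum (vals counts : List Int) (w : Int) : Int :=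
  (((vals.zip counts).filter (fun p => decide (p.1 < w))).map Prod.snd).sum

def eval_indices2__py_alt (indices : List (List Int)) : Int :=
  match indices with
  | [] => 1
  | first :: rest =>
    (rest.foldl
      (fun (st : List Int × List Int) nxt =>
        (nxt, nxt.map (fun w => pvRowSum st.1 st.2 w)))
      (first, first.map (fun _ => (1 : Int)))).2.sum

-- ===== PRECONDITION & SPEC =====
def Spec_eval_indices2__py (indices : List (List Int)) (out : Int) : Prop := out = eval_indices2__py_alt indices
instance (indices : List (List Int)) (out : Int) : Decidable (Spec_eval_indices2__py indices out) := by unfold Spec_eval_indices2__py; infer_instance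

-- ===== CLAIM (what is proved, stated in full; the proofs are below) =====
def Claim_equal_eval_indices2__py : Prop := ∀ (indices : List (List Int)), Dom_eval_indices2__py indices → Spec_eval_indices2__py indices (eval_indices2__py indices)

-- ===== LEMMAS AND PROOFS =====

-- number of strictly increasing tuples through ls whose first element exceeds x
def pvC : Int → List (List Int) → Int
  | _, [] => 1
  | x, l :: ls => ((l.filter (fun y => decide (x < y))).map (fun y => pvC y ls)).sum

-- number of strictly increasing tuples through ls
def pvCall : List (List Int) → Int
  | [] => 1
  | l :: ls => (l.map (fun y => pvC y ls)).sum

lemma pvIncr_nil : pvIncr [] = true := rfl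

lemma pvIncr_single (x : Int) : pvIncr [x] = true := rfl

lemma pvIncr_cons_cons (x y : Int) (t : List Int) :
    pvIncr (x :: y :: t) = (decide (x < y) && pvIncr (y :: t)) := by
  simp [pvIncr]

lemma sum_map_ite_filter (l : List Int) (p : Int → Bool) (f : Int → Int) :
    (l.map (fun y => if p y then f y else 0)).sum = ((l.filter p).map f).sum := by
  induction l with
  | nil => simp
  | cons a l ih =>
    by_cases h : p a <;> simp [h, ih]

lemma sum_map_add (l : List Int) (f g : Int → Int) :
    (l.map (fun x => f x + g x)).sum = (l.map f).sum + (l.map g).sum := by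
  induction l with
  | nil => simp
  | cons a l ih => simp [ih]; ring

lemma sum_map_mul_left (l : List Int) (b : Int) (f : Int → Int) :
    (l.map (fun x => b * f x)).sum = b * (l.map f).sum := by
  induction l with
  | nil => simp
  | cons a l ih => simp [ih]; ring

lemma countP_flatMap {α β : Type} (l : List α) (f : α → List β) (p : β → Bool) :
    (l.flatMap f).countP p = (l.map (fun x => (f x).countP p)).sum := by
  induction l with
  | nil => simp
  | cons a l ih => simp [List.flatMap_cons, List.countP_append, ih]

lemma countP_pvProd (ls : List (List Int)) : ∀ x : Int,
    (((pvProd ls).countP (fun t => pvIncr (x :: t)) : ℕ) : ℤ) = pvC x ls := by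
  induction ls with
  | nil =>
    intro x
    simp [pvProd, pvC, List.countP_cons, pvIncr_single]
  | cons l rest ih =>
    intro x
    rw [pvProd, countP_flatMap]
    have hstep : ∀ y : Int,
        ((((pvProd rest).map (fun t => y :: t)).countP (fun t => pvIncr (x :: t)) : ℕ) : ℤ)
          = if decide (x < y) then pvC y rest else 0 := by
      intro y
      rw [List.countP_map]
      have : ((fun t => pvIncr (x :: t)) ∘ (fun t => y :: t))
            = fun t => decide (x < y) && pvIncr (y :: t) := by
        funext t; simp [Function.comp, pvIncr_cons_cons]
      rw [this]
      by_cases h : x < y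
      · simp only [h, decide_true, Bool.true_and, if_true]
        exact ih y
      · simp [h]
    rw [Nat.cast_list_sum, List.map_map]
    have hrhs : pvC x (l :: rest) = (l.map (fun y => if decide (x < y) then pvC y rest else 0)).sum := by
      rw [sum_map_ite_filter]
      rfl
    rw [hrhs]
    apply congrArg List.sum
    apply List.map_congr_left
    intro y _
    simpa [Function.comp] using hstep y

lemma countP_pvProd_top (ls : List (List Int)) :
    (((pvProd ls).countP pvIncr : ℕ) : ℤ) = pvCall ls := by
  cases ls with
  | nil => simp [pvProd, pvCall, List.countP_cons, pvIncr_nil]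
  | cons l rest =>
    rw [pvProd, countP_flatMap, Nat.cast_list_sum, List.map_map, pvCall]
    apply congrArg List.sum
    apply List.map_congr_left
    intro y _
    have h := countP_pvProd rest y
    simpa [List.countP_map, Function.comp] using h

lemma foldl_count (L : List (List Int)) (c : Int) :
    L.foldl (fun cnt tup => if pvIncr tup then cnt + 1 else cnt) c = c + ((L.countP pvIncr : ℕ) : ℤ) := by
  induction L generalizing c with
  | nil => simp [List.countP]
  | cons t L ih =>
    rw [List.foldl_cons, ih, List.countP_cons]
    by_cases h : pvIncr t
    · simp [h]; push_cast; ring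
    · simp [h]

-- permutation invariance of the counts (A sorts each list, B does not)
lemma pvC_perm : ∀ (ls ls' : List (List Int)), List.Forall₂ List.Perm ls ls' →
    ∀ x : Int, pvC x ls = pvC x ls' := by
  intro ls ls' h
  induction h with
  | nil => intro x; rfl
  | @cons l l' ls ls' hperm _ ih =>
    intro x
    show ((l.filter _).map _).sum = ((l'.filter _).map _).sum
    have hmapeq : ∀ (m : List Int), m.map (fun y => pvC y ls) = m.map (fun y => pvC y ls') := by
      intro m; apply List.map_congr_left; intro y _; exact ih y
    rw [hmapeq]
    exact List.Perm.sum_eq (List.Perm.map _ (List.Perm.filter _ hperm))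

lemma pvCall_perm (ls ls' : List (List Int)) (h : List.Forall₂ List.Perm ls ls') :
    pvCall ls = pvCall ls' := by
  cases h with
  | nil => rfl
  | @cons l l' ls ls' hperm htail =>
    show (l.map _).sum = (l'.map _).sum
    have hmapeq : l.map (fun y => pvC y ls) = l.map (fun y => pvC y ls') := by
      apply List.map_congr_left; intro y _; exact pvC_perm ls ls' htail y
    rw [hmapeq]
    exact List.Perm.sum_eq (List.Perm.map _ hperm)

lemma forall2_sorted (ls : List (List Int)) :
    List.Forall₂ List.Perm (ls.map (fun lis => PySem.List.sorted lis (fun x => x) false)) ls := by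
  induction ls with
  | nil => exact List.Forall₂.nil
  | cons l ls ih => exact List.Forall₂.cons (PySem.List.sorted_perm l _ _) ih

-- weighted count carried by B's loop
def pvS (vals counts : List Int) (ls : List (List Int)) : Int :=
  ((vals.zip counts).map (fun p => p.2 * pvC p.1 ls)).sum

lemma swap_sums (P : List (Int × Int)) (nxt : List Int) (ls : List (List Int)) :
    (P.map (fun p => p.2 * pvC p.1 (nxt :: ls))).sum
      = (nxt.map (fun w =>
          (((P.filter (fun p => decide (p.1 < w))).map Prod.snd).sum) * pvC w ls)).sum := by
  induction P with
  | nil => simp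
  | cons p P ih =>
    rw [List.map_cons, List.sum_cons, ih]
    have hrhs : ∀ w : Int,
        ((((p :: P).filter (fun q => decide (q.1 < w))).map Prod.snd).sum) * pvC w ls
          = (if decide (p.1 < w) then p.2 * pvC w ls else 0)
            + (((P.filter (fun q => decide (q.1 < w))).map Prod.snd).sum) * pvC w ls := by
      intro w
      by_cases h : p.1 < w
      · simp [h]; ring
      · simp [h]
    calc p.2 * pvC p.1 (nxt :: ls)
          + (nxt.map (fun w => (((P.filter (fun q => decide (q.1 < w))).map Prod.snd).sum) * pvC w ls)).sum
        = (nxt.map (fun w => if decide (p.1 < w) then p.2 * pvC w ls else 0)).sum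
          + (nxt.map (fun w => (((P.filter (fun q => decide (q.1 < w))).map Prod.snd).sum) * pvC w ls)).sum := by
          congr 1
          rw [sum_map_ite_filter nxt (fun w => decide (p.1 < w)) (fun w => p.2 * pvC w ls),
              sum_map_mul_left]
          rfl
      _ = (nxt.map (fun w =>
            (if decide (p.1 < w) then p.2 * pvC w ls else 0)
              + (((P.filter (fun q => decide (q.1 < w))).map Prod.snd).sum) * pvC w ls)).sum := by
          rw [sum_map_add]
      _ = _ := by
          apply congrArg List.sum
          apply List.map_congr_left
          intro w _
          exact (hrhs w).symm

lemma zip_map_self (f : Int → Int) : ∀ l : List Int, l.zip (l.map f) = l.map (fun y => (y, f y))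
  | [] => rfl
  | a :: l => by
      simp only [List.map_cons, List.zip_cons_cons]
      rw [zip_map_self f l]

lemma loop_inv : ∀ (ls : List (List Int)) (vals counts : List Int),
    counts.length = vals.length →
    (ls.foldl (fun (st : List Int × List Int) nxt =>
        (nxt, nxt.map (fun w => pvRowSum st.1 st.2 w))) (vals, counts)).2.sum
      = pvS vals counts ls := by
  intro ls
  induction ls with
  | nil =>
    intro vals counts hlen
    show counts.sum = ((vals.zip counts).map (fun p => p.2 * pvC p.1 [])).sum
    have h1 : (vals.zip counts).map (fun p => p.2 * pvC p.1 []) = (vals.zip counts).map Prod.snd := by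
      apply List.map_congr_left; intro p _; simp [pvC]
    rw [h1, List.map_snd_zip (le_of_eq hlen)]
  | cons nxt ls ih =>
    intro vals counts hlen
    rw [List.foldl_cons]
    have hlen2 : (nxt.map (fun w => pvRowSum vals counts w)).length = nxt.length := by simp
    rw [ih nxt (nxt.map (fun w => pvRowSum vals counts w)) hlen2]
    show pvS nxt (nxt.map (fun w => pvRowSum vals counts w)) ls = pvS vals counts (nxt :: ls)
    unfold pvS
    rw [zip_map_self (fun w => pvRowSum vals counts w) nxt, List.map_map]
    rw [swap_sums (vals.zip counts) nxt ls]
    apply congrArg List.sum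
    apply List.map_congr_left
    intro w _
    simp [Function.comp, pvRowSum]

lemma eval_A_eq_pvCall (indices : List (List Int)) :
    eval_indices2__py indices = pvCall indices := by
  unfold eval_indices2__py
  rw [foldl_count, countP_pvProd_top, zero_add]
  exact pvCall_perm _ _ (forall2_sorted indices)

lemma eval_B_eq_pvCall (indices : List (List Int)) :
    eval_indices2__py_alt indices = pvCall indices := by
  cases indices with
  | nil => rfl
  | cons first rest =>
    have hred : eval_indices2__py_alt (first :: rest)
        = (rest.foldl (fun (st : List Int × List Int) nxt =>
            (nxt, nxt.map (fun w => pvRowSum st.1 st.2 w)))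
            (first, first.map (fun _ => (1 : Int)))).2.sum := rfl
    rw [hred, loop_inv rest first (first.map (fun _ => (1 : Int))) (by simp)]
    show pvS first (first.map (fun _ => (1 : Int))) rest = pvCall (first :: rest)
    unfold pvS pvCall
    rw [zip_map_self (fun _ => (1 : Int)) first, List.map_map]
    apply congrArg List.sum
    apply List.map_congr_left
    intro y _
    simp [Function.comp]

-- ===== VERDICT (by name: the statement is the Claim_ definition above) =====
theorem eval_indices2__py_spec : Claim_equal_eval_indices2__py := by
  intro indices _
  unfold Spec_eval_indices2__py
  rw [eval_A_eq_pvCall, eval_B_eq_pvCall]
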